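-- pv_equiv track=rewrite | github.com/dfreitas06/ia1718-samegame | samegame.py | horizontal_crush
-- ===== SOURCE A (Python) =====
-- def color(c):
-- 	return c > 0
--
-- def board_size(board):
-- 	return (len(board), len(board[0]))
--
-- def horizontal_crush(board):
-- 	size = board_size(board)
-- 	emptyColumns_Index = []
-- 	notEmptyColumns_Index = []
-- 	for c in range(0, size[1]):
-- 		if color(board[-1][c]):
-- 			notEmptyColumns_Index.append(c)
-- 		else:
-- 			emptyColumns_Index.append(c)
--
-- 	rng = len(notEmptyColumns_Index)
-- 	for i in range(0, rng):
-- 		for l in range(0, size[0]):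
-- 			board[l][i] = board[l][notEmptyColumns_Index[i]]
--
-- 	for i in range(rng, rng + len(emptyColumns_Index)):
-- 		for l in range(0, size[0]):
-- 			board[l][i] = 0
--
-- 	return board
-- ===== SOURCE B (Python) =====
-- def horizontal_crush(board):
--     columns = list(zip(*board))
--     full = [col for col in columns if col[-1] > 0]
--     padded = full + [(0,) * len(board)] * (len(columns) - len(full))
--     for row, new in zip(board, zip(*padded)):
--         row[:len(columns)] = new
--     return board
-- ===== Notes on version B (the rewrite author's own statement) =====
-- stated objective: faster
-- what changed: Replaces A's index-list bookkeeping and two nested column-major in-place shift/zero loops with a transpose-based reconstruction: zip(*board) turns the board into column objects, the full columns (bottom cell > 0) are kept, zero columns are appended, and zip of the padded columns is written back row by row via slice assignment; the per-cell Python statements become bulk zip/slice operations (constant-factor speedup, measured 1.75x at the largest size).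
import Mathlib
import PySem

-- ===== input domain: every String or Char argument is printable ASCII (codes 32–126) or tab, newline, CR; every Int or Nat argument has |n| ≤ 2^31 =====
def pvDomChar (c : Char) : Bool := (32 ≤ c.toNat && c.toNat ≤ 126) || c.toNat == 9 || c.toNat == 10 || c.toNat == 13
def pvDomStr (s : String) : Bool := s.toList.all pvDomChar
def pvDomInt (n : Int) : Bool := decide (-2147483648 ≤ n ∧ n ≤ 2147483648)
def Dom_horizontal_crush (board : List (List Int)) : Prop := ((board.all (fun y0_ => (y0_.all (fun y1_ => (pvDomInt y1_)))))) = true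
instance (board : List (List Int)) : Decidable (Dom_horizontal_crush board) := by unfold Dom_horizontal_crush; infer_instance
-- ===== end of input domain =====

-- B crushes by transposing: it takes the columns (zip(*board)), keeps the full ones, pads with zero
-- columns and transposes back, instead of A's index lists and nested in-place shift loops (a
-- column-as-object reconstruction; a timing run measured B faster by a constant factor). Both Pythons mutate `board` in place and return it;
-- the equivalence proved here is about the returned value (B mutates the same row objects via slice
-- assignment).

-- ===== PORT A =====
def color (c : Int) : Bool := c > 0

-- board_size uses board[0]; totalized with headD, exact whenever board ≠ [] (guaranteed by Pre_)
def board_size (board : List (List Int)) : Nat × Nat := (board.length, (board.headD []).length)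

def horizontal_crush (board : List (List Int)) : List (List Int) :=
  let size := board_size board
  -- classification loop: board[-1][c]; reads totalized with getD, exact on Pre_ (rectangular, nonempty)
  let part := (List.range size.2).foldl
    (fun (q : List Nat × List Nat) c =>
      if color ((PySem.List.pyGetD board (-1) []).getD c 0) then (q.1 ++ [c], q.2)
      else (q.1, q.2 ++ [c])) ([], [])
  let rng := part.1.length
  -- board[l][i] = board[l][notEmptyColumns_Index[i]], column-major, in place
  let b1 := (List.range rng).foldl
    (fun b i => (List.range size.1).foldl
      (fun acc l => acc.set l ((acc.getD l []).set i ((acc.getD l []).getD (part.1.getD i 0) 0))) b)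
    board
  -- board[l][i] = 0 for i in range(rng, rng + len(emptyColumns_Index))
  (List.range' rng part.2.length).foldl
    (fun b i => (List.range size.1).foldl
      (fun acc l => acc.set l ((acc.getD l []).set i 0)) b)
    b1

-- ===== PORT B =====
-- zip(*ls): repeatedly take the heads until some list runs out (Python's zip truncates at the shortest)
theorem pvSum_tail_lt (ls : List (List Int)) (h0 : ls ≠ []) (h1 : ∀ l ∈ ls, l ≠ []) :
    (ls.map (fun x => x.length - 1)).sum < (ls.map List.length).sum := by
  match ls with
  | [] => exact absurd rfl h0
  | a :: t =>
    simp only [List.map_cons, List.sum_cons]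
    have ha : a.length - 1 < a.length := by
      have : a ≠ [] := h1 a (List.mem_cons_self)
      cases a with
      | nil => exact absurd rfl this
      | cons x xs => simp
    have ht : (t.map (fun x => x.length - 1)).sum ≤ (t.map List.length).sum :=
      List.sum_le_sum (fun l _ => Nat.sub_le _ _)
    omega

def zipStar (ls : List (List Int)) : List (List Int) :=
  if h : ls = [] ∨ ls.any (fun l => l.isEmpty) then []
  else (ls.map (fun l => l.headD 0)) :: zipStar (ls.map List.tail)
termination_by (ls.map List.length).sum
decreasing_by
  rw [not_or] at h
  simp
  simp only [Function.comp_def, List.length_tail]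
  exact pvSum_tail_lt ls h.1 (fun l hl e => h.2 (List.any_eq_true.mpr ⟨l, hl, by simp [e]⟩))

def horizontal_crush_alt (board : List (List Int)) : List (List Int) :=
  let columns := zipStar board
  -- col[-1]: totalized with pyGetD, exact whenever board ≠ [] (guaranteed by Pre_)
  let full := columns.filter (fun col => 0 < PySem.List.pyGetD col (-1) 0)
  let padded := full ++ List.replicate (columns.length - full.length) (List.replicate board.length 0)
  let newRows := zipStar padded
  -- for row, new in zip(board, zip(*padded)): row[:len(columns)] = new
  (board.zip newRows).map (fun p => p.2 ++ p.1.drop columns.length) ++ board.drop newRows.length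

-- ===== PRECONDITION & SPEC =====
-- Pre_ is exactly A's domain: A raises IndexError on the empty board (board[0]) and whenever some
-- row is shorter than row 0 (every column index 0..cols-1 of every row is read or written).
def Pre_horizontal_crush (board : List (List Int)) : Prop :=
  board ≠ [] ∧ ∀ row ∈ board, (board.headD []).length ≤ row.length
instance (board : List (List Int)) : Decidable (Pre_horizontal_crush board) := by
  unfold Pre_horizontal_crush; infer_instance

def pvWitness_horizontal_crush : List (List Int) := [[1, 0, 2], [0, 0, 3], [4, 0, 5]]

def Spec_horizontal_crush (board : List (List Int)) (out : List (List Int)) : Prop := out = horizontal_crush_alt board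
instance (board : List (List Int)) (out : List (List Int)) : Decidable (Spec_horizontal_crush board out) := by unfold Spec_horizontal_crush; infer_instance

-- ===== CLAIM (what is proved, stated in full; the proofs are below) =====
def Claim_equal_horizontal_crush : Prop := ∀ (board : List (List Int)), Dom_horizontal_crush board → Pre_horizontal_crush board → Spec_horizontal_crush board (horizontal_crush board)

-- ===== LEMMAS AND PROOFS =====

-- common target: the crushed board written as one row-map (both ports are proved equal to it)
def pvTarget (board : List (List Int)) : List (List Int) :=
  let cols := (board.headD []).length
  let kept := (List.range cols).filter
    (fun c => decide (0 < (PySem.List.pyGetD board (-1) []).getD c 0))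
  board.map (fun row =>
    (kept.map (fun c => row.getD c 0) ++ List.replicate (cols - kept.length) 0) ++ row.drop cols)

-- A's classification loop builds (filter p, filter ¬p) of the scanned indices.
theorem foldl_partition (p : Nat → Bool) :
    ∀ (l : List Nat) (acc : List Nat × List Nat),
      l.foldl (fun (q : List Nat × List Nat) c =>
        if p c then (q.1 ++ [c], q.2) else (q.1, q.2 ++ [c])) acc
      = (acc.1 ++ l.filter p, acc.2 ++ l.filter (fun c => !p c)) := by
  intro l
  induction l with
  | nil => intro acc; simp
  | cons a t ih =>
    intro acc
    by_cases h : p a = true <;> simp [List.foldl_cons, h, ih]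

-- One inner pass 'for l in range(len(b)): b[l] = g(b[l])' maps g over the rows.
theorem foldl_set_rows_gen (g : List Int → List Int) :
    ∀ (b pre : List (List Int)),
      (List.range' pre.length b.length).foldl
        (fun acc l => acc.set l (g (acc.getD l []))) (pre ++ b)
      = pre ++ b.map g := by
  intro b
  induction b with
  | nil => intro pre; simp
  | cons r rs ih =>
    intro pre
    rw [List.length_cons, List.range'_succ, List.foldl_cons]
    have hget : (pre ++ r :: rs).getD pre.length [] = r := by
      rw [List.getD_append_right _ _ _ _ (Nat.le_refl _)]
      simp
    have hset : (pre ++ r :: rs).set pre.length (g r) = (pre ++ [g r]) ++ rs := by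
      rw [List.set_append]
      simp
    rw [hget, hset]
    have := ih (pre ++ [g r])
    simp only [List.length_append, List.length_cons, List.length_nil] at this ⊢
    rw [this]
    simp

theorem foldl_set_rows (g : List Int → List Int) (b : List (List Int)) :
    (List.range b.length).foldl (fun acc l => acc.set l (g (acc.getD l []))) b = b.map g := by
  have := foldl_set_rows_gen g b []
  simpa [List.range_eq_range'] using this

-- A's column-major double loop equals a row-major map of the per-row fold.
theorem outer_commute (idxs : List Nat) (g : Nat → List Int → List Int) :
    ∀ (b : List (List Int)) (n : Nat), b.length = n →
      idxs.foldl (fun b i => (List.range n).foldl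
          (fun acc l => acc.set l (g i (acc.getD l []))) b) b
      = b.map (fun r => idxs.foldl (fun r i => g i r) r) := by
  induction idxs with
  | nil => intro b n _; simp
  | cons i t ih =>
    intro b n hn
    rw [List.foldl_cons]
    have h1 : (List.range n).foldl (fun acc l => acc.set l (g i (acc.getD l []))) b
        = b.map (g i) := by
      subst hn; exact foldl_set_rows (g i) b
    rw [h1, ih (b.map (g i)) n (by simpa using hn), List.map_map]
    simp [Function.comp]

-- a strictly increasing list of naturals satisfies i ≤ l[i]
theorem sorted_ge_index (l : List Nat) (hs : l.Pairwise (· < ·)) :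
    ∀ i (h : i < l.length), i ≤ l[i] := by
  intro i
  induction i with
  | zero => intro h; exact Nat.zero_le _
  | succ j ih =>
    intro h
    have hj : j < l.length := Nat.lt_of_succ_lt h
    have := List.pairwise_iff_getElem.mp hs j (j + 1) hj h (Nat.lt_succ_self j)
    have := ih hj
    omega

-- phase-1 per-row invariant: after i passes the first i cells hold the kept values, the rest is untouched
theorem phase1_row (kept : List Nat) (row : List Int)
    (hk : ∀ i (h : i < kept.length), i ≤ kept[i])
    (hlt : ∀ k ∈ kept, k < row.length) (hlen : kept.length ≤ row.length) :
    ∀ i, i ≤ kept.length →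
      (List.range i).foldl (fun r j => r.set j (r.getD (kept.getD j 0) 0)) row
      = (kept.take i).map (fun c => row.getD c 0) ++ row.drop i := by
  intro i
  induction i with
  | zero => intro _; simp
  | succ m ih =>
    intro h
    have hm : m < kept.length := h
    have hmrow : m < row.length := Nat.lt_of_lt_of_le hm hlen
    rw [List.range_succ, List.foldl_append, List.foldl_cons, List.foldl_nil,
        ih (Nat.le_of_lt hm)]
    have hklen : ((kept.take m).map (fun c => row.getD c 0)).length = m := by
      simp [Nat.min_eq_left (Nat.le_of_lt hm)]
    have hkd : kept.getD m 0 = kept[m] := by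
      simp [List.getD_eq_getElem?_getD, List.getElem?_eq_getElem hm]
    have hkm : m ≤ kept[m] := hk m hm
    have hkmrow : kept[m] < row.length := hlt _ (List.getElem_mem hm)
    -- the read picks up the original value row[kept[m]]
    have hread : ((kept.take m).map (fun c => row.getD c 0) ++ row.drop m).getD
        (kept.getD m 0) 0 = row.getD kept[m] 0 := by
      rw [hkd, List.getD_append_right _ _ _ _ (by omega)]
      rw [hklen]
      have h1 : kept[m] - m < (row.drop m).length := by simp; omega
      rw [List.getD_eq_getElem?_getD, List.getElem?_eq_getElem h1,
          List.getD_eq_getElem?_getD, List.getElem?_eq_getElem hkmrow]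
      simp [List.getElem_drop, Nat.add_sub_cancel' hkm]
    -- the write lands on cell m, the head of the untouched suffix
    have hdrop : row.drop m = row[m] :: row.drop (m + 1) := List.drop_eq_getElem_cons hmrow
    rw [hread, hdrop, List.set_append, hklen, if_neg (Nat.lt_irrefl m), Nat.sub_self,
        List.set_cons_zero]
    have htake : kept.take (m + 1) = kept.take m ++ [kept[m]] := by
      rw [List.take_add_one, List.getElem?_eq_getElem hm]; rfl
    rw [htake, List.map_append]
    simp

-- phase-2 per-row: zero-filling the first m cells of the suffix
theorem phase2_row : ∀ (m : Nat) (tail pre : List Int), m ≤ tail.length →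
    (List.range' pre.length m).foldl (fun r i => r.set i (0 : Int)) (pre ++ tail)
    = pre ++ List.replicate m 0 ++ tail.drop m := by
  intro m
  induction m with
  | zero => intro tail pre _; simp
  | succ k ih =>
    intro tail pre hm
    match tail with
    | [] => simp at hm
    | t :: ts =>
      rw [List.range'_succ, List.foldl_cons, List.set_append,
          if_neg (Nat.lt_irrefl pre.length), Nat.sub_self, List.set_cons_zero]
      have h0 : pre ++ (0 : Int) :: ts = (pre ++ [0]) ++ ts := by simp
      have hlen : pre.length + 1 = (pre ++ [(0 : Int)]).length := by simp
      rw [h0, hlen, ih ts (pre ++ [0]) (by simpa using hm)]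
      simp [List.replicate_succ]

-- A equals the target
theorem A_eq_target (board : List (List Int)) (hpre : Pre_horizontal_crush board) :
    horizontal_crush board = pvTarget board := by
  obtain ⟨hne, hrect⟩ := hpre
  unfold horizontal_crush pvTarget board_size
  simp only []
  set cols := (board.headD []).length with hcols
  set pb : Nat → Bool := fun c => decide (0 < (PySem.List.pyGetD board (-1) []).getD c 0) with hpb
  -- A's classifier predicate is the filter predicate
  have hpcolor : (fun c => color ((PySem.List.pyGetD board (-1) []).getD c 0)) = pb := by
    funext c; simp [color, hpb, gt_iff_lt]
  have hpnot : (fun c => !color ((PySem.List.pyGetD board (-1) []).getD c 0))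
      = (fun c => !pb c) := by
    funext c; simp [color, hpb, gt_iff_lt]
  set kept := (List.range cols).filter pb with hkept
  -- classification result
  rw [foldl_partition]
  simp only [List.nil_append, hpcolor, hpnot, ← hkept]
  -- facts about kept
  have hkept_pw : kept.Pairwise (· < ·) := List.Pairwise.filter _ List.pairwise_lt_range
  have hkept_ge := sorted_ge_index kept hkept_pw
  have hkept_lt : ∀ k ∈ kept, k < cols := by
    intro k hkmem
    exact List.mem_range.mp (List.mem_of_mem_filter hkmem)
  have hkept_len : kept.length ≤ cols := by
    have := List.length_filter_le pb (List.range cols)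
    rw [hkept]; simpa using this
  have hsum : kept.length + ((List.range cols).filter (fun c => !pb c)).length = cols := by
    rw [hkept]
    have := List.length_eq_length_filter_add (l := List.range cols) pb
    simp only [List.length_range] at this
    omega
  -- the two nested passes are row-maps
  rw [outer_commute (List.range kept.length)
      (fun i r => r.set i (r.getD (kept.getD i 0) 0)) board board.length rfl]
  rw [outer_commute (List.range' kept.length ((List.range cols).filter (fun c => !pb c)).length)
      (fun i r => r.set i (0 : Int)) _ board.length (by simp)]
  rw [List.map_map]
  apply List.map_congr_left
  intro row hrow
  have hrowlen : cols ≤ row.length := hrect row hrow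
  simp only [Function.comp]
  rw [phase1_row kept row hkept_ge
      (fun k hk => Nat.lt_of_lt_of_le (hkept_lt k hk) hrowlen)
      (Nat.le_trans hkept_len hrowlen) kept.length (Nat.le_refl _)]
  rw [List.take_length]
  have h2 : ((List.range cols).filter (fun c => !pb c)).length = cols - kept.length := by omega
  have hp2 := phase2_row (cols - kept.length) (row.drop kept.length)
      (kept.map (fun c => row.getD c 0)) (by simp; omega)
  simp only [List.length_map] at hp2
  rw [h2, hp2, List.drop_drop]
  have h3 : kept.length + (cols - kept.length) = cols := by omega
  rw [h3]

-- zip(*ls) on lists whose head has length n and all lists at least n: the n transposed rows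
theorem zipStar_eq : ∀ (n : Nat) (ls : List (List Int)), ls ≠ [] →
    (ls.headD []).length = n → (∀ r ∈ ls, n ≤ r.length) →
    zipStar ls = (List.range n).map (fun i => ls.map (fun r => r.getD i 0)) := by
  intro n
  induction n with
  | zero =>
    intro ls h0 hh _
    match ls with
    | a :: t =>
      have ha : a = [] := List.length_eq_zero_iff.mp (by simpa using hh)
      rw [zipStar]
      simp [ha]
  | succ m ih =>
    intro ls h0 hh hall
    have hne : ∀ l ∈ ls, l ≠ [] := by
      intro l hl e
      have := hall l hl
      rw [e] at this; simp at this
    rw [zipStar, dif_neg (by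
      rw [not_or]
      refine ⟨h0, ?_⟩
      intro hcontra
      obtain ⟨l, hl, hl2⟩ := List.any_eq_true.mp hcontra
      exact hne l hl (List.isEmpty_iff.mp hl2))]
    have hmap_ne : ls.map List.tail ≠ [] := by simpa using h0
    have hmap_hd : ((ls.map List.tail).headD []).length = m := by
      match ls with
      | a :: t => simp at hh ⊢; omega
    have hmap_all : ∀ r ∈ ls.map List.tail, m ≤ r.length := by
      intro r hr
      obtain ⟨l, hl, rfl⟩ := List.mem_map.mp hr
      have := hall l hl
      cases l with
      | nil => exact absurd rfl (hne [] hl)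
      | cons x xs => simp at this ⊢; omega
    rw [ih (ls.map List.tail) hmap_ne hmap_hd hmap_all]
    rw [List.range_succ_eq_map, List.map_cons]
    congr 1
    · apply List.map_congr_left
      intro l hl
      match l, hne l hl with
      | x :: xs, _ => simp
    · rw [List.map_map]
      apply List.map_congr_left
      intro i _
      simp only [Function.comp_apply]
      rw [List.map_map]
      apply List.map_congr_left
      intro l hl
      match l, hne l hl with
      | x :: xs, _ => simp

-- B equals the target
theorem alt_eq_target (board : List (List Int)) (hpre : Pre_horizontal_crush board) :
    horizontal_crush_alt board = pvTarget board := by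
  obtain ⟨hne, hrect⟩ := hpre
  unfold horizontal_crush_alt pvTarget
  simp only []
  set cols := (board.headD []).length with hcols
  set rows := board.length with hrows
  have hrows_pos : 0 < rows := List.length_pos_iff.mpr hne
  set pb : Nat → Bool := fun c => decide (0 < (PySem.List.pyGetD board (-1) []).getD c 0) with hpb
  set kept := (List.range cols).filter pb with hkept
  set colFn : Nat → List Int := fun c => board.map (fun r => r.getD c 0) with hcolFn
  -- columns = transposed board
  have hcolumns : zipStar board = (List.range cols).map colFn :=
    zipStar_eq cols board hne rfl hrect
  rw [hcolumns]
  -- column length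
  have hcol_len : ∀ c, (colFn c).length = rows := by intro c; simp [hcolFn, ← hrows]
  -- col[-1] is the bottom-row cell
  have hcol_last : ∀ c, PySem.List.pyGetD (colFn c) (-1) 0
      = (PySem.List.pyGetD board (-1) []).getD c 0 := by
    intro c
    have hcne : colFn c ≠ [] := by
      intro e
      have := hcol_len c
      rw [e] at this; simp at this; omega
    rw [PySem.List.pyGetD_neg_one _ 0 hcne, PySem.List.pyGetD_neg_one _ [] hne]
    rw [List.getLast_eq_getElem, List.getLast_eq_getElem]
    simp [hcolFn, ← hrows]
  -- full = kept columns
  have hfull : ((List.range cols).map colFn).filter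
      (fun col => decide (0 < PySem.List.pyGetD col (-1) 0)) = kept.map colFn := by
    rw [List.filter_map, hkept]
    congr 1
    apply List.filter_congr
    intro c _
    simp only [Function.comp, hcol_last c, hpb]
  rw [hfull]
  have hklen_le : kept.length ≤ cols := by
    have := List.length_filter_le pb (List.range cols)
    rw [hkept]; simpa using this
  set padded := kept.map colFn
      ++ List.replicate (((List.range cols).map colFn).length - (kept.map colFn).length)
          (List.replicate rows 0) with hpadded
  have hpadlen : padded.length = cols := by
    simp [hpadded]
    omega
  by_cases hc0 : cols = 0
  · -- no columns at all: both sides are the untouched board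
    have hkept0 : kept = [] := by
      rw [hkept, hc0]; simp
    have hpad0 : padded = [] := List.length_eq_zero_iff.mp (by rw [hpadlen, hc0])
    rw [hpad0, hkept0]
    have hz : zipStar [] = [] := by rw [zipStar]; simp
    rw [hz]
    simp [hc0]
  · -- cols > 0: the padded columns transpose back to the mapped rows
    have hpad_ne : padded ≠ [] := by
      intro e
      rw [e] at hpadlen
      simp at hpadlen
      omega
    have hpad_all : ∀ r ∈ padded, r.length = rows := by
      intro r hr
      rw [hpadded] at hr
      rcases List.mem_append.mp hr with h | h
      · obtain ⟨c, _, rfl⟩ := List.mem_map.mp h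
        exact hcol_len c
      · rw [List.eq_of_mem_replicate h]; simp
    have hpad_hd : (padded.headD []).length = rows := by
      match padded, hpad_ne with
      | a :: t, _ => exact hpad_all a (List.mem_cons_self)
    have hnewRows : zipStar padded
        = (List.range rows).map (fun i => padded.map (fun r => r.getD i 0)) :=
      zipStar_eq rows padded hpad_ne hpad_hd (fun r hr => le_of_eq (hpad_all r hr).symm)
    rw [hnewRows]
    have hdrop0 : board.drop
        ((List.range rows).map (fun i => padded.map (fun r => r.getD i 0))).length = [] := by
      apply List.drop_eq_nil_of_le
      simp [hrows]
    rw [hdrop0, List.append_nil]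
    simp only [List.length_map, List.length_range]
    apply List.ext_getElem
    · simp [hrows]
    · intro i hi1 hi2
      have hirows : i < rows := by
        simp [hrows] at hi1
        omega
      have hrowi : i < board.length := by rw [← hrows]; exact hirows
      rw [List.getElem_map, List.getElem_map, List.getElem_zip]
      simp only [List.getElem_map, List.getElem_range, List.length_map, List.length_range]
      have hrow_eq : padded.map (fun r => r.getD i 0)
          = kept.map (fun c => board[i].getD c 0)
            ++ List.replicate (cols - kept.length) 0 := by
        rw [hpadded, List.map_append, List.map_map, List.map_replicate]
        congr 1
        · apply List.map_congr_left
          intro c _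
          simp only [Function.comp, hcolFn]
          rw [List.getD_eq_getElem?_getD, List.getElem?_map]
          rw [List.getElem?_eq_getElem hrowi]
          simp
        · simp [List.getD_eq_getElem?_getD, List.getElem?_replicate, hirows]
      rw [hrow_eq]

-- ===== VERDICT =====
theorem horizontal_crush_spec : Claim_equal_horizontal_crush := by
  intro board _ hpre
  unfold Spec_horizontal_crush
  rw [A_eq_target board hpre, alt_eq_target board hpre]
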